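-- pv_equiv track=rewrite | github.com/fueled-by-matcha/intro-to-python3 | code_challenge_Aug20.py | over_nine_thousand
-- ===== SOURCE A (Python) =====
-- def over_nine_thousand(lst):
--   count = 0
--   if len(lst) == 0:
--     return 0
--   for number in lst:
--     count += number
--     if count > 9000:
--       break
--   return count
-- ===== SOURCE B (Python) =====
-- def over_nine_thousand(lst):
--   if len(lst) == 0:
--     return 0
--   sums = []
--   total = 0
--   for n in lst:
--     total += n
--     sums.append(total)
--   for s in sums:
--     if s > 9000:
--       return s
--   return sums[-1]
-- ===== Notes on version B (the rewrite author's own statement) =====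
-- stated objective: alternative
-- what changed: A fuses accumulation and the >9000 test in one loop with break; B first builds the full prefix-sum list in one pass, then separately scans it for the first sum exceeding 9000, falling back to the last prefix sum (the total).
import Mathlib
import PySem

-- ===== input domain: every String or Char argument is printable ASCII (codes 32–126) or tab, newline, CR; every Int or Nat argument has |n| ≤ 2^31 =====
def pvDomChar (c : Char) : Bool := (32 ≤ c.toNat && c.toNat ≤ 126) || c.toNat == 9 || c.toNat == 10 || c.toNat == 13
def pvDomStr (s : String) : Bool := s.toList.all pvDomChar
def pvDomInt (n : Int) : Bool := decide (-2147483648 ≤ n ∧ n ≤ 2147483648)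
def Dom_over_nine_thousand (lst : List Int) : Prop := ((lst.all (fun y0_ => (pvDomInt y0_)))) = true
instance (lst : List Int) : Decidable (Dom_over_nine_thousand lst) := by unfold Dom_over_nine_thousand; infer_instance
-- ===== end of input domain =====

-- B separates A's fused accumulate-and-test loop into two phases: build the prefix-sum list, then search it (same O(n) cost).


-- ===== PORT A =====
-- A's for-loop with break: add each number to count, stop early once count > 9000.
def overLoopA : Int → List Int → Int
  | count, [] => count
  | count, number :: rest =>
    let count' := count + number
    if count' > 9000 then count' else overLoopA count' rest

def over_nine_thousand (lst : List Int) : Int :=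
  if lst.length = 0 then 0 else overLoopA 0 lst

-- ===== PORT B =====
-- Phase 1 of B: build the list of prefix sums (sums.append(total) loop).
def prefixSumsB : Int → List Int → List Int
  | _, [] => []
  | total, n :: rest => (total + n) :: prefixSumsB (total + n) rest

-- Phase 2 of B: scan the prefix sums for the first one > 9000; fall back to sums[-1].
def over_nine_thousand_alt (lst : List Int) : Int :=
  if lst.length = 0 then 0
  else
    let sums := prefixSumsB 0 lst
    match sums.find? (fun s => decide (s > 9000)) with
    | some s => s
    | none => sums.getLastD 0

-- ===== PRECONDITION & SPEC =====
def Spec_over_nine_thousand (lst : List Int) (out : Int) : Prop := out = over_nine_thousand_alt lst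
instance (lst : List Int) (out : Int) : Decidable (Spec_over_nine_thousand lst out) := by unfold Spec_over_nine_thousand; infer_instance

-- ===== CLAIM (what is proved, stated in full; the proofs are below) =====
def Claim_equal_over_nine_thousand : Prop := ∀ (lst : List Int), Dom_over_nine_thousand lst → Spec_over_nine_thousand lst (over_nine_thousand lst)

-- ===== LEMMAS AND PROOFS =====

lemma prefixSumsB_ne_nil (c : Int) (n : Int) (rest : List Int) :
    prefixSumsB c (n :: rest) ≠ [] := by
  simp [prefixSumsB]

lemma overLoopA_eq_search (lst : List Int) : ∀ (c : Int), lst ≠ [] →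
    overLoopA c lst =
      (match (prefixSumsB c lst).find? (fun s => decide (s > 9000)) with
       | some s => s
       | none => (prefixSumsB c lst).getLastD 0) := by
  induction lst with
  | nil => intro c h; exact absurd rfl h
  | cons n rest ih =>
    intro c _
    simp only [overLoopA, prefixSumsB, List.find?]
    by_cases hgt : c + n > 9000
    · simp [hgt]
    · have hd : (decide (c + n > 9000)) = false := by simp [hgt]
      rw [if_neg hgt, hd]
      cases rest with
      | nil => simp [overLoopA, prefixSumsB, List.getLastD]
      | cons m rest' =>
        rw [ih (c + n) (by simp)]
        have hne := prefixSumsB_ne_nil (c + n) m rest'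
        cases hf : (prefixSumsB (c + n) (m :: rest')).find? (fun s => decide (s > 9000)) with
        | some s => simp
        | none =>
          simp only
          cases hps : prefixSumsB (c + n) (m :: rest') with
          | nil => exact absurd hps hne
          | cons a as => simp [List.getLastD]

-- ===== VERDICT (by name: the statement is the Claim_ definition above) =====
theorem over_nine_thousand_spec : Claim_equal_over_nine_thousand := by
  intro lst _
  unfold Spec_over_nine_thousand over_nine_thousand over_nine_thousand_alt
  cases lst with
  | nil => simp
  | cons n rest =>
    simp only [List.length_cons, Nat.succ_ne_zero, if_false]
    exact overLoopA_eq_search (n :: rest) 0 (by simp)
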